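-- pv_equiv track=rewrite | github.com/Snooker4Real/Python_files | Pavage Virgile.py | liste
-- ===== SOURCE A (Python) =====
-- def liste(L,N):
--     L2=[]
--     for i in range(N):
--         if i in L:
--             L2.append(1)
--         else:
--             L2.append(0)
--     return L2
-- ===== SOURCE B (Python) =====
-- def liste(L, N):
--     # Allocate the output up front and scatter 1s at the positions listed in L.
--     L2 = [0] * N if N > 0 else []
--     for v in L:
--         if 0 <= v < N:
--             L2[v] = 1
--     return L2
-- ===== Notes on version B (the rewrite author's own statement) =====
-- stated objective: faster
-- what changed: Instead of scanning every position 0..N-1 and testing membership in L (an inner linear scan), B allocates [0]*N once and scatters 1 at each in-range value of L.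
import Mathlib
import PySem

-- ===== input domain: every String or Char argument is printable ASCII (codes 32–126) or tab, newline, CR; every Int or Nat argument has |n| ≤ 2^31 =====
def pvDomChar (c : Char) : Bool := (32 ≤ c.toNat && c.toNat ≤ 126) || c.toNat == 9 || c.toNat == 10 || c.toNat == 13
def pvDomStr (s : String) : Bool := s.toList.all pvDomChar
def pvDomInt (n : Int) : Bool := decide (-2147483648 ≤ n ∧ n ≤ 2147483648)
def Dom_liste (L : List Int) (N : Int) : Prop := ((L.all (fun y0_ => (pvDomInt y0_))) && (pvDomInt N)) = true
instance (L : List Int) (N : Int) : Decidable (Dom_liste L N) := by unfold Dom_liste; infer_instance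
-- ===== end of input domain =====

-- B replaces A's position-scan with membership test by a one-pass scatter into a preallocated zero list (asymptotically faster).


-- ===== PORT A =====
def liste (L : List Int) (N : Int) : List Int :=
  (PySem.List.pyRange 0 N 1).foldl (fun L2 i => L2 ++ [if i ∈ L then 1 else 0]) []

-- ===== PORT B =====
def liste_alt (L : List Int) (N : Int) : List Int :=
  L.foldl (fun L2 v => if 0 ≤ v ∧ v < N then L2.set v.toNat 1 else L2)
    (if N > 0 then List.replicate N.toNat 0 else [])

-- ===== PRECONDITION & SPEC =====
def Spec_liste (L : List Int) (N : Int) (out : List Int) : Prop := out = liste_alt L N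
instance (L : List Int) (N : Int) (out : List Int) : Decidable (Spec_liste L N out) := by unfold Spec_liste; infer_instance

-- ===== CLAIM (what is proved, stated in full; the proofs are below) =====
def Claim_equal_liste : Prop := ∀ (L : List Int) (N : Int), Dom_liste L N → Spec_liste L N (liste L N)

-- ===== LEMMAS AND PROOFS =====

-- A's foldl-append loop is the map over the range
theorem foldl_append_map {α β : Type} (xs : List α) (f : α → β) (acc : List β) :
    xs.foldl (fun a x => a ++ [f x]) acc = acc ++ xs.map f := by
  induction xs generalizing acc with
  | nil => simp
  | cons x xs ih => simp [List.foldl, ih]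

-- the scatter fold preserves the accumulator's length
theorem scatter_length (L : List Int) (N : Int) (acc : List Int) :
    (L.foldl (fun L2 v => if 0 ≤ v ∧ v < N then L2.set v.toNat 1 else L2) acc).length
      = acc.length := by
  induction L generalizing acc with
  | nil => rfl
  | cons v L ih => simp only [List.foldl]; split <;> simp [ih]

-- each entry of the scatter result is 1 iff its index occurs in L
theorem scatter_get (L : List Int) (N : Int) (acc : List Int) (i : Nat)
    (h : i < acc.length) (hN : acc.length = N.toNat)
    (hres : i < (L.foldl (fun L2 v => if 0 ≤ v ∧ v < N then L2.set v.toNat 1 else L2) acc).length) :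
    (L.foldl (fun L2 v => if 0 ≤ v ∧ v < N then L2.set v.toNat 1 else L2) acc)[i]
      = if (i : Int) ∈ L then 1 else acc[i] := by
  induction L generalizing acc with
  | nil => simp
  | cons v L ih =>
    simp only [List.foldl] at hres ⊢
    by_cases hc : 0 ≤ v ∧ v < N
    · simp only [if_pos hc] at hres ⊢
      rw [ih (acc.set v.toNat 1) (by simpa using h) (by simpa using hN) hres]
      by_cases hmem : (i : Int) ∈ L
      · simp [hmem]
      · simp only [List.mem_cons, hmem, or_false]
        by_cases heq : (i : Int) = v
        · have : v.toNat = i := by omega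
          simp [heq, this]
        · have hne : v.toNat ≠ i := by omega
          simp [heq, hne]
    · simp only [if_neg hc] at hres ⊢
      rw [ih acc h hN hres]
      have heq : (i : Int) ≠ v := by
        intro e
        apply hc
        constructor <;> omega
      simp [heq]

theorem liste_alt_eq (L : List Int) (N : Int) :
    liste_alt L N = (PySem.List.pyRange 0 N 1).map (fun i => if i ∈ L then 1 else 0) := by
  unfold liste_alt
  by_cases hN : N > 0
  · rw [if_pos hN]
    have hlen := scatter_length L N (List.replicate N.toNat (0:Int))
    apply List.ext_getElem
    · simp [hlen, PySem.List.length_pyRange_one]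
    · intro i h1 h2
      have hi : i < N.toNat := by
        rw [hlen] at h1; simpa using h1
      rw [scatter_get L N _ i (by simpa using hi) (by simp) h1]
      rw [List.getElem_map]
      rw [PySem.List.getElem_pyRange_one]
      simp
  · rw [if_neg hN]
    rw [PySem.List.pyRange_one_eq_nil (by omega)]
    have hlen := scatter_length L N ([] : List Int)
    simp only [List.map_nil]
    exact List.eq_nil_of_length_eq_zero (by simpa using hlen)

-- ===== VERDICT (by name: the statement is the Claim_ definition above) =====
theorem liste_spec : Claim_equal_liste := by
  intro L N _
  unfold Spec_liste liste
  rw [foldl_append_map, liste_alt_eq]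
  simp
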